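-- pv_equiv track=rewrite | github.com/kevintakano/Competitive-Programming-KevinTakano | URI/1243/code.py | is_a_word
-- ===== SOURCE A (Python) =====
-- import string
--
-- alpha = string.ascii_lowercase + string.ascii_uppercase + '.'
--
-- def hasJustOnePointOccurrence(word):
--     occurrences = 0
--     for c in word:
--         if c == '.':
--             occurrences += 1
--
--         if occurrences > 1:
--             return False
--
--     return occurrences == 1
--
-- def is_a_word(simb):
--
--     isInAlpha = True
--     for c in simb:
--         if c not in alpha:
--             isInAlpha = False
--             break
--
--     hasOnlyLastPoint = False
--
--     if(simb[len(simb)-1] == '.' and hasJustOnePointOccurrence(simb) == True):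
--         hasOnlyLastPoint = True
--
--     if isInAlpha == True and hasOnlyLastPoint == True and '.' in simb and len(simb) > 1:
--         return True
--     elif isInAlpha == True and '.' not in simb:
--         return True
--     else:
--         return False
-- ===== SOURCE B (Python) =====
-- import string
--
-- _letters = set(string.ascii_letters)
--
--
-- def is_a_word(simb):
--     # branch on trailing period, then validate the letter core in one pass
--     if simb[len(simb) - 1] == '.':
--         core = simb[:-1]
--         return bool(core) and all(c in _letters for c in core)
--     return all(c in _letters for c in simb)
-- ===== Notes on version B (the rewrite author's own statement) =====
-- stated objective: simpler
-- what changed: B branches once on the trailing period and validates the stripped core against a plain-letters set in a single pass, replacing A's whole-string alpha scan plus separate period-counting helper and flag combination.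
import Mathlib
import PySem

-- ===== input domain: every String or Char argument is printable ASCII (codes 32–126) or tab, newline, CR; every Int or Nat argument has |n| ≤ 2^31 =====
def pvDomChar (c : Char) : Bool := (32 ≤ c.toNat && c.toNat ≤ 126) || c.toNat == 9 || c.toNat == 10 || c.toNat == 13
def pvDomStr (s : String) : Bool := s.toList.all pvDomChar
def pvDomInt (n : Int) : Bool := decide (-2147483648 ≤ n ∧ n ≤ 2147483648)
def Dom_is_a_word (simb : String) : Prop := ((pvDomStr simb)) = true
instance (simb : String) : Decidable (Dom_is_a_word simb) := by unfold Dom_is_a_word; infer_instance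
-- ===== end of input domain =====

-- B replaces A's whole-string alpha scan + separate period-counting helper + flag combination by one
-- branch on the trailing period and a single letters-only check of the remaining core (objective: simpler).

-- ===== PORT A =====
-- alpha = string.ascii_lowercase + string.ascii_uppercase + '.'
def pvAlpha : List Char :=
  "abcdefghijklmnopqrstuvwxyz".toList ++ "ABCDEFGHIJKLMNOPQRSTUVWXYZ".toList ++ ['.']

-- the for-loop of hasJustOnePointOccurrence (its early 'return False' is the `false` branch)
def pvOneDotLoop : List Char → Nat → Bool
  | [], occurrences => occurrences == 1
  | c :: rest, occurrences =>
    let occurrences := if c == '.' then occurrences + 1 else occurrences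
    if occurrences > 1 then false else pvOneDotLoop rest occurrences

def hasJustOnePointOccurrence (word : String) : Bool := pvOneDotLoop word.toList 0

-- A's first for-loop with its break (the isInAlpha flag)
def pvAlphaLoop : List Char → Bool
  | [] => true
  | c :: rest => if !(pvAlpha.contains c) then false else pvAlphaLoop rest

def is_a_word (simb : String) : Bool :=
  let cs := simb.toList
  let isInAlpha := pvAlphaLoop cs
  -- simb[len(simb)-1]: pyGet? is none exactly where Python raises IndexError (empty simb, excluded by Pre_)
  let hasOnlyLastPoint :=
    if PySem.List.pyGet? cs ((cs.length : Int) - 1) == some '.' && hasJustOnePointOccurrence simb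
    then true else false
  if isInAlpha && hasOnlyLastPoint && cs.contains '.' && decide (cs.length > 1) then true
  else if isInAlpha && !(cs.contains '.') then true
  else false

-- ===== PORT B =====
-- _letters = set(string.ascii_letters)
def pvLetters : List Char :=
  "abcdefghijklmnopqrstuvwxyz".toList ++ "ABCDEFGHIJKLMNOPQRSTUVWXYZ".toList

def is_a_word_alt (simb : String) : Bool :=
  let cs := simb.toList
  if PySem.List.pyGet? cs ((cs.length : Int) - 1) == some '.' then
    let core := PySem.List.slice cs none (some (-1))   -- simb[:-1]
    !core.isEmpty && core.all (fun c => pvLetters.contains c)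
  else
    cs.all (fun c => pvLetters.contains c)

-- ===== PRECONDITION & SPEC =====
-- A evaluates simb[len(simb)-1], which raises IndexError on the empty string; only that input is excluded.
def Pre_is_a_word (simb : String) : Prop := simb ≠ ""
instance (simb : String) : Decidable (Pre_is_a_word simb) := by unfold Pre_is_a_word; infer_instance
def pvWitness_is_a_word : String := "abc."

def Spec_is_a_word (simb : String) (out : Bool) : Prop := out = is_a_word_alt simb
instance (simb : String) (out : Bool) : Decidable (Spec_is_a_word simb out) := by unfold Spec_is_a_word; infer_instance

-- ===== CLAIM (what is proved, stated in full; the proofs are below) =====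
def Claim_equal_is_a_word : Prop := ∀ (simb : String), Dom_is_a_word simb → Pre_is_a_word simb → Spec_is_a_word simb (is_a_word simb)

-- ===== LEMMAS AND PROOFS =====

lemma pvAlpha_eq : pvAlpha = pvLetters ++ ['.'] := by
  simp [pvAlpha, pvLetters]

-- per character: in alpha and not '.' is exactly being a letter
lemma pvChar_alpha_letter (c : Char) :
    (pvAlpha.contains c && !(c == '.')) = pvLetters.contains c := by
  by_cases h : c = '.'
  · subst h; decide
  · simp [pvAlpha_eq, h]

lemma pvAlphaLoop_eq (cs : List Char) :
    pvAlphaLoop cs = cs.all (fun c => pvAlpha.contains c) := by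
  induction cs with
  | nil => rfl
  | cons c rest ih =>
    simp only [pvAlphaLoop, List.all_cons, ih]
    cases pvAlpha.contains c <;> simp

-- A's counting loop decides "occ + number of periods = 1" (for occ ≤ 1)
lemma pvOneDotLoop_eq (cs : List Char) (occ : Nat) (h : occ ≤ 1) :
    pvOneDotLoop cs occ = decide (occ + cs.count '.' = 1) := by
  induction cs generalizing occ with
  | nil =>
    simp only [pvOneDotLoop, List.count_nil, Nat.add_zero]
    cases h' : occ == 1 <;> simp_all
  | cons c rest ih =>
    by_cases hc : c = '.'
    · subst hc
      simp only [pvOneDotLoop, beq_self_eq_true, if_true, List.count_cons_self]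
      interval_cases occ
      · rw [if_neg (by omega), ih 1 (by omega)]
        simp
      · rw [if_pos (by omega)]
        simp
    · have hc' : (c == '.') = false := by simp [hc]
      simp only [pvOneDotLoop, hc', Bool.false_eq_true, if_false]
      rw [if_neg (by omega), ih occ h]
      simp [hc]

-- whole-list version of pvChar_alpha_letter
lemma pvAll_alpha_letters (ds : List Char) :
    (ds.all (fun c => pvAlpha.contains c) && !ds.contains '.') = ds.all (fun c => pvLetters.contains c) := by
  induction ds with
  | nil => rfl
  | cons c rest ih =>
    simp only [List.all_cons, List.contains_cons, Bool.not_or, ← ih, ← pvChar_alpha_letter c,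
      show ('.' == c) = (c == '.') from BEq.comm]
    cases pvAlpha.contains c <;> cases (c == '.') <;>
      cases rest.all (fun c => pvAlpha.contains c) <;> cases rest.contains '.' <;> simp

-- ===== VERDICT (by name: the statement is the Claim_ definition above) =====
theorem is_a_word_spec : Claim_equal_is_a_word := by
  intro simb _ hpre
  unfold Spec_is_a_word
  have hne : simb.toList ≠ [] := fun h => hpre (String.toList_eq_nil_iff.mp h)
  obtain ⟨ds, l, hcs⟩ := List.eq_nil_or_concat simb.toList |>.resolve_left hne
  rw [List.concat_eq_append] at hcs
  unfold is_a_word is_a_word_alt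
  simp only [hcs]
  have hget : PySem.List.pyGet? (ds ++ [l]) (((ds ++ [l]).length : Int) - 1) = some l := by
    have h1 : (((ds ++ [l]).length : Int) - 1) = ((ds.length : Nat) : Int) := by
      simp [List.length_append]
    rw [h1]
    exact PySem.List.pyGet?_append_length ds [] l
  have hslice : PySem.List.slice (ds ++ [l]) none (some (-1)) = ds := by
    rw [PySem.List.slice_to_neg_one]
    simp
  rw [hget, hslice, pvAlphaLoop_eq]
  by_cases hl : l = '.'
  · subst hl
    rw [hasJustOnePointOccurrence, hcs, pvOneDotLoop_eq _ 0 (by omega)]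
    have hcount : (ds ++ ['.']).count '.' = ds.count '.' + 1 := by
      simp
    rw [hcount]
    have hc1 : decide (0 + (ds.count '.' + 1) = 1) = !ds.contains '.' := by
      cases hD : ds.contains '.'
      · have : '.' ∉ ds := by simpa using hD
        simp [List.count_eq_zero.mpr this]
      · have : '.' ∈ ds := by simpa using hD
        have : ds.count '.' ≠ 0 := by
          simpa [List.count_eq_zero] using this
        simp; omega
    have hcontains : (ds ++ ['.']).contains '.' = true := by simp
    have hlen : decide ((ds ++ ['.']).length > 1) = !ds.isEmpty := by
      cases ds <;> simp
    have hall : (ds ++ ['.']).all (fun c => pvAlpha.contains c)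
        = ds.all (fun c => pvAlpha.contains c) := by
      simp [pvAlpha_eq]
    have hallB : (ds ++ ['.']).all (fun c => pvLetters.contains c)
        = (ds.all (fun c => pvLetters.contains c) && pvLetters.contains '.') := by
      simp
    rw [hc1, hcontains, hlen, hall]
    simp only [beq_self_eq_true, Bool.true_and, Bool.and_true, if_true]
    rw [← pvAll_alpha_letters ds]
    cases hA : ds.all (fun c => pvAlpha.contains c) <;>
      cases hD : ds.contains '.' <;> cases hE : ds.isEmpty <;> simp
  · have hl' : ((l == '.') = false) := by simp [hl]
    have hsome : ((some l == some '.') = false) := by simp [hl]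
    have hcontains : (ds ++ [l]).contains '.' = ds.contains '.' := by
      simp [Ne.symm hl]
    have hall : (ds ++ [l]).all (fun c => pvAlpha.contains c)
        = (ds.all (fun c => pvAlpha.contains c) && pvAlpha.contains l) := by
      simp
    have hallB : (ds ++ [l]).all (fun c => pvLetters.contains c)
        = (ds.all (fun c => pvLetters.contains c) && pvLetters.contains l) := by
      simp
    rw [hcontains, hall, hallB, hsome]
    simp only [Bool.false_and, Bool.false_eq_true, if_false, Bool.and_false]
    rw [← pvAll_alpha_letters ds, ← pvChar_alpha_letter l, hl']
    cases hA : ds.all (fun c => pvAlpha.contains c) <;>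
      cases hD : ds.contains '.' <;> cases hAl : pvAlpha.contains l <;> simp
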